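-- pv_equiv track=rewrite | github.com/yogeshdevnani/Image-Comparision | wspace_funcn_calling.py | comp_reduce
-- ===== SOURCE A (Python) =====
-- def comp_reduce(matrix):    #Compare and Reduce
--     #Assuming we get 2d array
--     if len(matrix) < 100 and len(matrix[0]) < 100:        #what if the ratio is f*cked up? like in place of or?
--         return matrix
--     ans = []
--     for i in range(0, len(matrix)-3,3):
--         line = []
--         for j in range(0,len(matrix[0])-3,3): #What if i or j=13 when len = 14
--             t = max(max(matrix[i][j:j+3]),max(matrix[i+1][j:j+3]),max(matrix[i+2][j:j+3]))
--             line.append(t)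
--         ans.append(line)
--
--     return comp_reduce(ans)
-- ===== SOURCE B (Python) =====
-- def pool1(row, w):
--     # horizontal 3-max-pool of one row, bounds taken from the first row's width w
--     return [max(row[j:j + 3]) for j in range(0, w - 3, 3)]
--
--
-- def comp_reduce(matrix):
--     # Iterative: each step pools every used row horizontally first, then folds each
--     # 3-row block of pooled rows elementwise with max (A pools per 3x3 cell recursively).
--     while not (len(matrix) < 100 and len(matrix[0]) < 100):
--         w = len(matrix[0])
--         matrix = [[max(a, b, c) for a, b, c in
--                    zip(pool1(matrix[i], w), pool1(matrix[i + 1], w), pool1(matrix[i + 2], w))]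
--                   for i in range(0, len(matrix) - 3, 3)]
--     return matrix
-- ===== Notes on version B (the rewrite author's own statement) =====
-- stated objective: alternative
-- what changed: Replaces A's recursion with an iterative while-loop and decomposes each pooling step differently: B first max-pools each used row horizontally in slices of 3, then folds each 3-row block of the pooled rows elementwise with max via zip, instead of A's per-cell max over three separate row slices.
-- outside the precondition, e.g. on comp_reduce([]): A raises IndexError, B raises IndexError
import Mathlib
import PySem

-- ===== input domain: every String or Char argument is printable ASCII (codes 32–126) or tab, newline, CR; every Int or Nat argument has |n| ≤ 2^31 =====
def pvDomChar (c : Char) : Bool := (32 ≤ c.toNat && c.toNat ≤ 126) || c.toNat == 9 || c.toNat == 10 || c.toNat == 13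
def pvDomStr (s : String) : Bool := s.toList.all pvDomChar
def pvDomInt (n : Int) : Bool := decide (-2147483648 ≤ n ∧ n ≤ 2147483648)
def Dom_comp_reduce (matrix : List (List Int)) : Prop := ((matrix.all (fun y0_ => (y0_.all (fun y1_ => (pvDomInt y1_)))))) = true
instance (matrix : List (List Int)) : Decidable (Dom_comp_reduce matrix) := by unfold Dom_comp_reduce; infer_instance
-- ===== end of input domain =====

-- B replaces A's recursion with an iterative loop whose step pools every used row
-- horizontally first and then folds each 3-row block of pooled rows elementwise with max
-- (alternative decomposition, same cost).

-- Python max(xs) over a nonempty list; max([]) raises ValueError in Python (excluded by Pre_), 0 is a placeholder.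
def pyMax (l : List Int) : Int :=
  match l with
  | [] => 0
  | x :: t => t.foldl max x

-- length of range(0, n-3, 3) is < n for n ≥ 1 (cited by both ports' decreasing_by)
theorem pv_range3_len_lt (n : Nat) (hn : 1 ≤ n) :
    (PySem.List.pyRange 0 ((n : Int) - 3) 3).length < n := by
  rw [PySem.List.pyRange_of_pos 0 ((n : Int) - 3) (by norm_num)]
  simp only [List.length_map, List.length_range]
  split_ifs with h <;> omega

-- ===== PORT A =====
def comp_reduce (matrix : List (List Int)) : List (List Int) :=
  -- guard: len(matrix) < 100 and len(matrix[0]) < 100; matrix[0] on [] raises IndexError (excluded by Pre_)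
  if matrix.length < 100 ∧ ((PySem.List.pyGet? matrix 0).getD []).length < 100 then
    matrix
  else
    comp_reduce
      ((PySem.List.pyRange 0 ((matrix.length : Int) - 3) 3).foldl (fun ans i =>
        ans ++
          [(PySem.List.pyRange 0 ((((PySem.List.pyGet? matrix 0).getD []).length : Int) - 3) 3).foldl
            (fun line j =>
              line ++
                [max
                  (max
                    (pyMax (PySem.List.slice (PySem.List.pyGetD matrix i []) (some j) (some (j + 3))))
                    (pyMax (PySem.List.slice (PySem.List.pyGetD matrix (i + 1) []) (some j) (some (j + 3)))))
                  (pyMax (PySem.List.slice (PySem.List.pyGetD matrix (i + 2) []) (some j) (some (j + 3))))])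
            []]) [])
termination_by matrix.length
decreasing_by
  rename_i h
  rw [PySem.List.foldl_append_singleton_eq_map]
  simp only [List.nil_append, List.length_map]
  refine pv_range3_len_lt _ ?_
  by_contra hn
  simp only [not_le, Nat.lt_one_iff, List.length_eq_zero_iff] at hn
  subst hn
  simp [PySem.List.pyGet?, PySem.List.pyIdx?] at h

-- ===== PORT B =====
-- pool1(row, w): horizontal 3-max-pool of one row, bounds from the first row's width w
def pool1 (row : List Int) (w : Int) : List Int :=
  (PySem.List.pyRange 0 (w - 3) 3).map
    (fun j => pyMax (PySem.List.slice row (some j) (some (j + 3))))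

def comp_reduce_alt (matrix : List (List Int)) : List (List Int) :=
  -- while not (len(matrix) < 100 and len(matrix[0]) < 100):
  --   w = len(matrix[0]); matrix = [[max(a,b,c) for a,b,c in zip(pool1(matrix[i],w), pool1(matrix[i+1],w), pool1(matrix[i+2],w))] for i in range(0, len(matrix)-3, 3)]
  if matrix.length < 100 ∧ ((PySem.List.pyGet? matrix 0).getD []).length < 100 then
    matrix
  else
    comp_reduce_alt
      ((PySem.List.pyRange 0 ((matrix.length : Int) - 3) 3).map (fun i =>
        List.zipWith (fun a bc => max (max a bc.1) bc.2)
          (pool1 (PySem.List.pyGetD matrix i [])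
            (((PySem.List.pyGet? matrix 0).getD []).length : Int))
          ((pool1 (PySem.List.pyGetD matrix (i + 1) [])
              (((PySem.List.pyGet? matrix 0).getD []).length : Int)).zip
            (pool1 (PySem.List.pyGetD matrix (i + 2) [])
              (((PySem.List.pyGet? matrix 0).getD []).length : Int)))))
termination_by matrix.length
decreasing_by
  rename_i h
  simp only [List.length_map]
  refine pv_range3_len_lt _ ?_
  by_contra hn
  simp only [not_le, Nat.lt_one_iff, List.length_eq_zero_iff] at hn
  subst hn
  simp [PySem.List.pyGet?, PySem.List.pyIdx?] at h

-- ===== PRECONDITION & SPEC =====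
-- Pre_ holds exactly where the Python A returns a value; it excludes only the inputs
-- on which A raises: the empty matrix (IndexError at matrix[0]), matrices whose row
-- count collapses to zero under pooling while the column count is still ≥ 100 at some
-- recursion depth (IndexError on the emptied matrix; the closed-form inequality
-- 201·3^(log₃(2r+1)−1) ≥ 2c+3 over the dimensions says exactly that this never happens),
-- and pooled ragged matrices with a used row so short that a 3-slice of it is empty
-- (ValueError at max([]) in the first pooling step).
def Pre_comp_reduce (matrix : List (List Int)) : Prop :=
  matrix ≠ [] ∧
  2 * (matrix.headD []).length + 3 ≤ 201 * 3 ^ (Nat.log 3 (2 * matrix.length + 1) - 1) ∧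
  (¬ (matrix.length < 100 ∧ (matrix.headD []).length < 100) →
    (matrix.headD []).length < 4 ∨
      ∀ row ∈ matrix.take (3 * ((matrix.length - 4) / 3) + 3),
        3 * (((matrix.headD []).length - 4) / 3) < row.length)
instance (matrix : List (List Int)) : Decidable (Pre_comp_reduce matrix) := by
  unfold Pre_comp_reduce; infer_instance

def pvWitness_comp_reduce : List (List Int) := [[1, 2], [3]]

def Spec_comp_reduce (matrix : List (List Int)) (out : List (List Int)) : Prop := out = comp_reduce_alt matrix
instance (matrix : List (List Int)) (out : List (List Int)) : Decidable (Spec_comp_reduce matrix out) := by unfold Spec_comp_reduce; infer_instance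

-- ===== CLAIM (what is proved, stated in full; the proofs are below) =====
def Claim_equal_comp_reduce : Prop := ∀ (matrix : List (List Int)), Dom_comp_reduce matrix → Pre_comp_reduce matrix → Spec_comp_reduce matrix (comp_reduce matrix)

-- ===== LEMMAS AND PROOFS =====

-- zipWith/zip over three maps of the same list collapses to one map
theorem pv_zip3_map {α β : Type} (l : List α) (f0 f1 f2 : α → β) (g : β → β → β → β) :
    List.zipWith (fun a bc => g a bc.1 bc.2) (l.map f0) ((l.map f1).zip (l.map f2))
      = l.map (fun x => g (f0 x) (f1 x) (f2 x)) := by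
  induction l with
  | nil => rfl
  | cons x t ih => simpa using ih

-- one output row: A's inner append-loop equals B's pool-then-zip row
theorem pv_row_eq (matrix : List (List Int)) (i : Int) :
    (PySem.List.pyRange 0 ((((PySem.List.pyGet? matrix 0).getD []).length : Int) - 3) 3).foldl
      (fun line j =>
        line ++
          [max
            (max
              (pyMax (PySem.List.slice (PySem.List.pyGetD matrix i []) (some j) (some (j + 3))))
              (pyMax (PySem.List.slice (PySem.List.pyGetD matrix (i + 1) []) (some j) (some (j + 3)))))
            (pyMax (PySem.List.slice (PySem.List.pyGetD matrix (i + 2) []) (some j) (some (j + 3))))])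
      []
    = List.zipWith (fun a bc => max (max a bc.1) bc.2)
        (pool1 (PySem.List.pyGetD matrix i [])
          (((PySem.List.pyGet? matrix 0).getD []).length : Int))
        ((pool1 (PySem.List.pyGetD matrix (i + 1) [])
            (((PySem.List.pyGet? matrix 0).getD []).length : Int)).zip
          (pool1 (PySem.List.pyGetD matrix (i + 2) [])
            (((PySem.List.pyGet? matrix 0).getD []).length : Int))) := by
  rw [PySem.List.foldl_append_singleton_eq_map, List.nil_append]
  simp only [pool1]
  exact (pv_zip3_map _ _ _ _ (fun a b c => max (max a b) c)).symm

theorem pv_main (n : Nat) : ∀ (matrix : List (List Int)), matrix.length ≤ n →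
    comp_reduce matrix = comp_reduce_alt matrix := by
  induction n with
  | zero =>
    intro m hm
    have : m = [] := List.length_eq_zero_iff.mp (Nat.le_zero.mp hm)
    subst this
    rw [comp_reduce.eq_def, comp_reduce_alt.eq_def]
    norm_num [PySem.List.pyGet?, PySem.List.pyIdx?]
  | succ n ih =>
    intro m hm
    rw [comp_reduce.eq_def, comp_reduce_alt.eq_def]
    by_cases hg : m.length < 100 ∧ ((PySem.List.pyGet? m 0).getD []).length < 100
    · rw [if_pos hg, if_pos hg]
    · rw [if_neg hg, if_neg hg]
      have hne : m ≠ [] := by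
        intro h; subst h
        exact hg ⟨by simp, by simp [PySem.List.pyGet?, PySem.List.pyIdx?]⟩
      have hstep :
          (PySem.List.pyRange 0 ((m.length : Int) - 3) 3).foldl (fun ans i =>
            ans ++
              [(PySem.List.pyRange 0 ((((PySem.List.pyGet? m 0).getD []).length : Int) - 3) 3).foldl
                (fun line j =>
                  line ++
                    [max
                      (max
                        (pyMax (PySem.List.slice (PySem.List.pyGetD m i []) (some j) (some (j + 3))))
                        (pyMax (PySem.List.slice (PySem.List.pyGetD m (i + 1) []) (some j) (some (j + 3)))))
                      (pyMax (PySem.List.slice (PySem.List.pyGetD m (i + 2) []) (some j) (some (j + 3))))])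
                []]) []
          = (PySem.List.pyRange 0 ((m.length : Int) - 3) 3).map (fun i =>
              List.zipWith (fun a bc => max (max a bc.1) bc.2)
                (pool1 (PySem.List.pyGetD m i [])
                  (((PySem.List.pyGet? m 0).getD []).length : Int))
                ((pool1 (PySem.List.pyGetD m (i + 1) [])
                    (((PySem.List.pyGet? m 0).getD []).length : Int)).zip
                  (pool1 (PySem.List.pyGetD m (i + 2) [])
                    (((PySem.List.pyGet? m 0).getD []).length : Int)))) := by
        rw [PySem.List.foldl_append_singleton_eq_map, List.nil_append]
        exact List.map_congr_left (fun i _ => pv_row_eq m i)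
      rw [hstep]
      apply ih
      have hlt := pv_range3_len_lt m.length (by
        have : m.length ≠ 0 := by simpa [List.length_eq_zero_iff] using hne
        omega)
      simp only [List.length_map]
      omega

-- ===== VERDICT (by name: the statement is the Claim_ definition above) =====
theorem comp_reduce_spec : Claim_equal_comp_reduce := by
  intro matrix _ _
  unfold Spec_comp_reduce
  exact pv_main matrix.length matrix le_rfl
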